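-- pv_equiv track=rewrite | github.com/PrabhTheCoder/ITI1120 | ASSIGNMENTS/A4-students/a4_300018569_old.py | people_with_most_friends
-- ===== SOURCE A (Python) =====
-- def people_with_most_friends(network):
--     '''(2Dlist)->1D list
--     Given a 2D-list for friendship network, returns a list of people (IDs) who have the most friends in network.'''
--     max_friends=[]
--     # YOUR CODE GOES HERE
--
--     num_friends = [len(i[1]) for i in network]
--     max_num = max(num_friends)
--
--     for i in range(len(num_friends)):
--         if num_friends[i] == max_num:
--             max_friends.append(network[i][0])
--
--     return max_friends
-- ===== SOURCE B (Python) =====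
-- def people_with_most_friends(network):
--     '''(2Dlist)->1D list
--     Given a 2D-list for friendship network, returns a list of people (IDs) who have the most friends in network.'''
--     if not network:
--         raise ValueError("max() arg is an empty sequence")
--     best = -1
--     result = []
--     for person in network:
--         c = len(person[1])
--         if c > best:
--             best = c
--             result = [person[0]]
--         elif c == best:
--             result.append(person[0])
--     return result
-- ===== Notes on version B (the rewrite author's own statement) =====
-- stated objective: simpler
-- what changed: Single pass maintaining the running best count and the current winners list, instead of building a counts list, taking max, and rescanning by index.
-- outside the precondition, e.g. on people_with_most_friends([]): A raises ValueError, B raises ValueError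
import Mathlib
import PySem

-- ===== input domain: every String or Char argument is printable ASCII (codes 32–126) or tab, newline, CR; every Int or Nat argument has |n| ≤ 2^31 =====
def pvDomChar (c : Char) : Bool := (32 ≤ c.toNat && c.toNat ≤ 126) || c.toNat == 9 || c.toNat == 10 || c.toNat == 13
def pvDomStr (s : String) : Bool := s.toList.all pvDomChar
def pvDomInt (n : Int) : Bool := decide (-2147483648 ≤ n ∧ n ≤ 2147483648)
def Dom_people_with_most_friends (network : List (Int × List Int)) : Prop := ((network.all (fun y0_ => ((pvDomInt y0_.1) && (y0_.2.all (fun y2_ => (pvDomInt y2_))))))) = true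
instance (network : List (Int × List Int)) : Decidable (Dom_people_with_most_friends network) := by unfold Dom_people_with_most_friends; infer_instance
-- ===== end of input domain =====

-- B replaces A's three passes (counts list, max, index rescan) by one loop keeping the running
-- best count and current winners (objective: simpler). Pre_ excludes the empty network, on
-- which both Pythons raise ValueError.


-- ===== PORT A =====
-- num_friends = [len(i[1]) for i in network]; max_num = max(num_friends);
-- then an index loop appending network[i][0] whenever num_friends[i] == max_num.
-- On the empty network Python's max([]) raises; the port returns [] there (excluded by Pre_).
def people_with_most_friends (network : List (Int × List Int)) : List Int :=
  let num_friends : List Int := network.map (fun i => (i.2.length : Int))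
  match PySem.List.max? num_friends (fun y => y) with
  | none => []
  | some max_num =>
    (List.range num_friends.length).foldl
      (fun max_friends i =>
        if num_friends.getD i 0 = max_num then
          max_friends ++ [(network.getD i (0, [])).1]
        else max_friends) []

-- ===== PORT B =====
-- single pass: (best, result); raise on empty network ported as [] (excluded by Pre_).
def people_with_most_friends_alt (network : List (Int × List Int)) : List Int :=
  if network = [] then []
  else
    (network.foldl
      (fun (st : Int × List Int) person =>
        let c : Int := person.2.length
        if c > st.1 then (c, [person.1])
        else if c = st.1 then (st.1, st.2 ++ [person.1])
        else st) (-1, [])).2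

-- ===== PRECONDITION & SPEC =====
-- Pre_ excludes only the empty network: there A's max([]) raises ValueError (B raises too).
def Pre_people_with_most_friends (network : List (Int × List Int)) : Prop := network ≠ []
instance (network : List (Int × List Int)) : Decidable (Pre_people_with_most_friends network) := by unfold Pre_people_with_most_friends; infer_instance
def pvWitness_people_with_most_friends : (List (Int × List Int)) := [(1, [2, 3]), (2, [1])]
def Spec_people_with_most_friends (network : List (Int × List Int)) (out : List Int) : Prop := out = people_with_most_friends_alt network
instance (network : List (Int × List Int)) (out : List Int) : Decidable (Spec_people_with_most_friends network out) := by unfold Spec_people_with_most_friends; infer_instance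

-- ===== CLAIM (what is proved, stated in full; the proofs are below) =====
def Claim_equal_people_with_most_friends : Prop := ∀ (network : List (Int × List Int)), Dom_people_with_most_friends network → Pre_people_with_most_friends network → Spec_people_with_most_friends network (people_with_most_friends network)

-- ===== LEMMAS AND PROOFS =====

-- reference value: ids of people whose friend count equals m, in network order
def pvSel (m : Int) (net : List (Int × List Int)) : List Int :=
  (net.filter (fun p => (p.2.length : Int) = m)).map Prod.fst

theorem pvSel_cons (m : Int) (p : Int × List Int) (t : List (Int × List Int)) :
    pvSel m (p :: t) = (if (p.2.length : Int) = m then [p.1] else []) ++ pvSel m t := by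
  by_cases h : (p.2.length : Int) = m <;> simp [pvSel, h]

-- the running max is an upper bound of its seed
theorem pvFoldMax_ge (t : List (Int × List Int)) : ∀ b : Int,
    b ≤ t.foldl (fun a p => max a (p.2.length : Int)) b := by
  induction t with
  | nil => intro b; simp
  | cons p t ih =>
      intro b
      exact le_trans (le_max_left _ _) (ih (max b (p.2.length : Int)))

-- A's index loop over range(len) builds exactly pvSel
theorem pvA_loop (net : List (Int × List Int)) (m : Int) (acc : List Int) :
    (List.range (net.map (fun i => ((i.2.length : Int)))).length).foldl
      (fun max_friends i =>
        if (net.map (fun i => ((i.2.length : Int)))).getD i 0 = m then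
          max_friends ++ [(net.getD i (0, ([] : List Int))).1]
        else max_friends) acc = acc ++ pvSel m net := by
  induction net generalizing acc m with
  | nil => simp [pvSel]
  | cons p t ih =>
      simp only [List.map_cons, List.length_cons, List.length_map] at ih ⊢
      have hshift :
          (List.range (t.length + 1)).foldl
            (fun max_friends i =>
              if ((p.2.length : Int) :: t.map (fun i => ((i.2.length : Int)))).getD i 0 = m then
                max_friends ++ [((p :: t).getD i (0, ([] : List Int))).1]
              else max_friends) acc
          = (List.range t.length).foldl
            (fun max_friends i =>
              if (t.map (fun i => ((i.2.length : Int)))).getD i 0 = m then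
                max_friends ++ [(t.getD i (0, ([] : List Int))).1]
              else max_friends)
            (if ((p.2.length : Int)) = m then acc ++ [p.1] else acc) := by
        rw [List.range_succ_eq_map, List.foldl_cons, List.foldl_map]
        simp
      refine hshift.trans ?_
      rw [ih, pvSel_cons]
      by_cases h : (p.2.length : Int) = m <;> simp [h]

-- B's loop step, written out (zeta-reduced form of the port's fold body)
def pvStep (st : Int × List Int) (person : Int × List Int) : Int × List Int :=
  if (person.2.length : Int) > st.1 then ((person.2.length : Int), [person.1])
  else if (person.2.length : Int) = st.1 then (st.1, st.2 ++ [person.1])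
  else st

def pvRunMax (b : Int) (net : List (Int × List Int)) : Int :=
  net.foldl (fun a p => max a (p.2.length : Int)) b

theorem pvRunMax_ge (t : List (Int × List Int)) : ∀ b : Int, b ≤ pvRunMax b t := by
  intro b; exact pvFoldMax_ge t b

-- B's single pass: from state (b, acc) it yields the running max M and
-- (acc if nothing exceeded b, else fresh) ++ pvSel M of the suffix
theorem pvB_loop (net : List (Int × List Int)) : ∀ (b : Int) (acc : List Int),
    net.foldl pvStep (b, acc)
    = (pvRunMax b net, (if pvRunMax b net = b then acc else []) ++ pvSel (pvRunMax b net) net) := by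
  induction net with
  | nil => intro b acc; simp [pvRunMax, pvSel]
  | cons p t ih =>
      intro b acc
      rw [List.foldl_cons, pvSel_cons]
      by_cases h1 : (p.2.length : Int) > b
      · have hstep : pvStep (b, acc) p = ((p.2.length : Int), [p.1]) := by
          simp [pvStep, h1]
        have hRM : pvRunMax b (p :: t) = pvRunMax ((p.2.length : Int)) t := by
          unfold pvRunMax
          rw [List.foldl_cons, max_eq_right (le_of_lt h1)]
        rw [hstep, ih, hRM]
        have hMc : (p.2.length : Int) ≤ pvRunMax ((p.2.length : Int)) t := pvRunMax_ge t _
        have hMb : pvRunMax ((p.2.length : Int)) t ≠ b := by omega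
        by_cases h2 : pvRunMax ((p.2.length : Int)) t = (p.2.length : Int)
        · simp [h2]
          intro h; omega
        · have h2' : ¬ ((p.2.length : Int) = pvRunMax ((p.2.length : Int)) t) :=
            fun h => h2 h.symm
          simp [h2', hMb, h2]
      · have hRM : pvRunMax b (p :: t) = pvRunMax b t := by
          unfold pvRunMax
          rw [List.foldl_cons, max_eq_left (by omega)]
        by_cases h2 : (p.2.length : Int) = b
        · have hstep : pvStep (b, acc) p = (b, acc ++ [p.1]) := by
            simp [pvStep, h2]
          rw [hstep, ih, hRM]
          by_cases h3 : pvRunMax b t = b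
          · simp [h2, h3]
          · have : ¬ ((p.2.length : Int) = pvRunMax b t) := by
              rw [h2]; exact fun h => h3 h.symm
            simp [this, h3]
        · have hstep : pvStep (b, acc) p = (b, acc) := by
            simp [pvStep, h1, h2]
          rw [hstep, ih, hRM]
          have hMb : b ≤ pvRunMax b t := pvRunMax_ge t b
          have : ¬ ((p.2.length : Int) = pvRunMax b t) := by omega
          simp [this]

-- ===== VERDICT (by name: the statement is the Claim_ definition above) =====
theorem people_with_most_friends_spec : Claim_equal_people_with_most_friends := by
  intro network _ hpre
  unfold Spec_people_with_most_friends people_with_most_friends people_with_most_friends_alt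
  have hfun : (fun (st : Int × List Int) person =>
      let c : Int := person.2.length
      if c > st.1 then (c, [person.1])
      else if c = st.1 then (st.1, st.2 ++ [person.1])
      else st) = pvStep := rfl
  cases network with
  | nil => exact absurd rfl hpre
  | cons p t =>
      simp only [if_neg (List.cons_ne_nil p t), hfun]
      rw [pvB_loop]
      have hmax0 : pvRunMax (-1) (p :: t) = pvRunMax ((p.2.length : Int)) t := by
        unfold pvRunMax
        rw [List.foldl_cons]
        have : (0 : Int) ≤ (p.2.length : Int) := Int.natCast_nonneg _
        rw [max_eq_right (by omega)]
      set M := pvRunMax ((p.2.length : Int)) t with hMdef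
      have hmaxq : PySem.List.max? ((p :: t).map (fun i => ((i.2.length : Int)))) (fun y => y)
          = some M := by
        rw [List.map_cons, PySem.List.max?_id_cons, List.foldl_map]
        rfl
      simp only [hmaxq]
      rw [pvA_loop, hmax0]
      have hMne : M ≠ -1 := by
        have h1 : ((p.2.length : Int)) ≤ M := pvRunMax_ge t _
        have : (0 : Int) ≤ (p.2.length : Int) := Int.natCast_nonneg _
        omega
      simp [hMne]
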